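-- pv_equiv track=rewrite | github.com/yulonglin/articulating-learned-rules | src/generate_datasets.py | eval_all_uppercase_words
-- ===== SOURCE A (Python) =====
-- def eval_all_uppercase_words(text: str) -> bool:
--     """Check if all words consist entirely of uppercase letters."""
--     words = text.split()
--     if not words:
--         return False
--     for word in words:
--         # Check if word has any alphabetic characters
--         alpha_chars = [c for c in word if c.isalpha()]
--         if not alpha_chars:
--             # Skip words with no letters (e.g., numbers, punctuation)
--             continue
--         # If word has letters, they must all be uppercase
--         if not all(c.isupper() for c in alpha_chars):
--             return False
--     # At least one word must have letters
--     return any(any(c.isalpha() for c in word) for word in words)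
-- ===== SOURCE B (Python) =====
-- def eval_all_uppercase_words(text: str) -> bool:
--     """Check if all words consist entirely of uppercase letters."""
--     letters = [c for c in text if c.isalpha()]
--     return bool(letters) and all(c.isupper() for c in letters)
-- ===== Notes on version B (the rewrite author's own statement) =====
-- stated objective: simpler
-- what changed: Replaced split-into-words, per-word loop with skip/early-return and a final any(...) re-scan by one flat filter of the alphabetic characters of the raw text, valid because whitespace splitting never removes or reorders letters.
import Mathlib
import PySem

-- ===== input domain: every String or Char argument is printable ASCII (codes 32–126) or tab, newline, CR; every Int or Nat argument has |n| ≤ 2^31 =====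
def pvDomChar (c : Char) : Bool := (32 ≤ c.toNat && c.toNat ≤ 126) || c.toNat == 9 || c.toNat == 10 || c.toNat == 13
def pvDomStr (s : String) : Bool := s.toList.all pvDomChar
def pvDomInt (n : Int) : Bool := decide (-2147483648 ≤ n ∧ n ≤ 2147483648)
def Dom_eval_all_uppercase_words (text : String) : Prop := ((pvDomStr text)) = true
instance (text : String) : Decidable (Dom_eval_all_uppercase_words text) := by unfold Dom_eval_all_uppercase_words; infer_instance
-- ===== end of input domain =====

-- B replaces A's word-splitting, per-word loop and final any(...) re-scan by one flat filter of
-- the text's alphabetic characters (objective: simpler; same return value everywhere).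

-- ===== PORT A =====
-- the 'for word in words' loop with its continue / early-return-False, carrying the full word
-- list for the final 'return any(...)' executed when the loop falls through
def pvALoop (words allwords : List (List Char)) : Bool :=
  match words with
  | [] => allwords.any (fun w => w.any PySem.Chars.isalpha)
  | w :: rest =>
    let alpha_chars := w.filter PySem.Chars.isalpha
    if alpha_chars.isEmpty then pvALoop rest allwords
    else if !(alpha_chars.all PySem.Chars.isupper) then false
    else pvALoop rest allwords

def eval_all_uppercase_words (text : String) : Bool :=
  let words := PySem.Chars.split₀ text.toList
  if words.isEmpty then false
  else pvALoop words words

-- ===== PORT B =====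
def eval_all_uppercase_words_alt (text : String) : Bool :=
  let letters := text.toList.filter PySem.Chars.isalpha
  !letters.isEmpty && letters.all PySem.Chars.isupper

-- ===== PRECONDITION & SPEC =====
def Spec_eval_all_uppercase_words (text : String) (out : Bool) : Prop := out = eval_all_uppercase_words_alt text
instance (text : String) (out : Bool) : Decidable (Spec_eval_all_uppercase_words text out) := by unfold Spec_eval_all_uppercase_words; infer_instance

-- ===== CLAIM (what is proved, stated in full; the proofs are below) =====
def Claim_equal_eval_all_uppercase_words : Prop := ∀ (text : String), Dom_eval_all_uppercase_words text → Spec_eval_all_uppercase_words text (eval_all_uppercase_words text)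

-- ===== LEMMAS AND PROOFS =====

-- an alphabetic character is never whitespace
lemma isalpha_not_isspace (c : Char) (h : PySem.Chars.isalpha c = true) :
    PySem.Chars.isspace c = false := by
  simp only [PySem.Chars.isalpha, PySem.Chars.isupper, PySem.Chars.islower,
    Bool.or_eq_true, Bool.and_eq_true, decide_eq_true_eq] at h
  rw [← Bool.not_eq_true]
  simp only [PySem.Chars.isspace, Bool.or_eq_true, Bool.and_eq_true, decide_eq_true_eq]
  have eA : ('A').toNat = 65 := by decide
  have eZ : ('Z').toNat = 90 := by decide
  have ea : ('a').toNat = 97 := by decide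
  have ez : ('z').toNat = 122 := by decide
  rcases h with ⟨h1, h2⟩ | ⟨h1, h2⟩
  · have l1 : ('A').toNat ≤ c.toNat := Fin.mk_le_mk.mp h1
    have l2 : c.toNat ≤ ('Z').toNat := Fin.mk_le_mk.mp h2
    rw [eA] at l1; rw [eZ] at l2
    omega
  · have l1 : ('a').toNat ≤ c.toNat := Fin.mk_le_mk.mp h1
    have l2 : c.toNat ≤ ('z').toNat := Fin.mk_le_mk.mp h2
    rw [ea] at l1; rw [ez] at l2
    omega

-- split₀'s worker: flattening the produced words recovers the non-whitespace characters
lemma split₀_go_flatten : ∀ (s cur : List Char) (acc : List (List Char)),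
    (PySem.Chars.split₀.go s cur acc).flatten
      = acc.reverse.flatten ++ cur.reverse ++ s.filter (fun c => !PySem.Chars.isspace c) := by
  intro s
  induction s with
  | nil =>
    intro cur acc
    by_cases h : cur.isEmpty <;> simp_all [PySem.Chars.split₀.go, List.isEmpty_iff]
  | cons c rest ih =>
    intro cur acc
    by_cases hs : PySem.Chars.isspace c
    · by_cases hc : cur.isEmpty <;>
        simp_all [PySem.Chars.split₀.go, List.isEmpty_iff, ih]
    · simp_all [PySem.Chars.split₀.go, ih]

lemma split₀_flatten (s : List Char) :
    (PySem.Chars.split₀ s).flatten = s.filter (fun c => !PySem.Chars.isspace c) := by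
  simpa using split₀_go_flatten s [] []

lemma filter_alpha_flatten (s : List Char) :
    ((PySem.Chars.split₀ s).map (fun w => w.filter PySem.Chars.isalpha)).flatten
      = s.filter PySem.Chars.isalpha := by
  rw [← List.filter_flatten, split₀_flatten, List.filter_filter]
  congr 1
  funext c
  by_cases h : PySem.Chars.isalpha c
  · simp [h, isalpha_not_isspace c h]
  · simp [h]

-- characterisation of A's loop
lemma pvALoop_eq (allwords : List (List Char)) : ∀ (ws : List (List Char)),
    pvALoop ws allwords
      = ((ws.all fun w => (w.filter PySem.Chars.isalpha).all PySem.Chars.isupper)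
          && allwords.any (fun w => w.any PySem.Chars.isalpha)) := by
  intro ws
  induction ws with
  | nil => simp [pvALoop]
  | cons w rest ih =>
    simp only [pvALoop, List.all_cons]
    by_cases he : (w.filter PySem.Chars.isalpha).isEmpty
    · have hT : (w.filter PySem.Chars.isalpha).all PySem.Chars.isupper = true := by
        rw [List.isEmpty_iff] at he; rw [he]; rfl
      rw [if_pos he, ih, hT, Bool.true_and]
    · rw [if_neg he]
      by_cases hu : (w.filter PySem.Chars.isalpha).all PySem.Chars.isupper
      · rw [hu, ih]
        simp only [Bool.not_true, Bool.false_eq_true, if_false, Bool.true_and]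
      · have hu' : (w.filter PySem.Chars.isalpha).all PySem.Chars.isupper = false := by
          rwa [Bool.not_eq_true] at hu
        rw [hu']
        simp only [Bool.not_false, if_true, Bool.false_and, if_pos rfl]

-- Bool bridge: A's loop characterisation equals B's flat-filter form over the flattened words
lemma bool_bridge (words : List (List Char)) :
    ((words.all fun w => (w.filter PySem.Chars.isalpha).all PySem.Chars.isupper)
      && words.any (fun w => w.any PySem.Chars.isalpha))
    = (!((words.map (fun w => w.filter PySem.Chars.isalpha)).flatten).isEmpty
      && ((words.map (fun w => w.filter PySem.Chars.isalpha)).flatten).all PySem.Chars.isupper) := by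
  have h1 : ((words.map (fun w => w.filter PySem.Chars.isalpha)).flatten).all PySem.Chars.isupper
      = (words.all fun w => (w.filter PySem.Chars.isalpha).all PySem.Chars.isupper) := by
    rw [List.all_flatten, List.all_map]
    rfl
  have h2 : (!((words.map (fun w => w.filter PySem.Chars.isalpha)).flatten).isEmpty)
      = words.any (fun w => w.any PySem.Chars.isalpha) := by
    rw [Bool.eq_iff_iff, Bool.not_eq_true', ← Bool.ne_false_iff, ne_eq, Bool.not_eq_false,
      List.isEmpty_eq_false_iff, List.any_eq_true]
    rw [ne_eq, List.flatten_eq_nil_iff]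
    constructor
    · intro h
      by_contra hn
      push_neg at hn
      apply h
      intro l hl
      simp only [List.mem_map] at hl
      obtain ⟨w, hw, rfl⟩ := hl
      rw [List.filter_eq_nil_iff]
      intro c hc
      have := hn w hw
      simp only [ne_eq, List.any_eq_true, not_exists, not_and] at this
      simpa using this c hc
    · rintro ⟨w, hw, hwa⟩ h
      rw [List.any_eq_true] at hwa
      obtain ⟨c, hc, hca⟩ := hwa
      have := h _ (List.mem_map.mpr ⟨w, hw, rfl⟩)
      rw [List.filter_eq_nil_iff] at this
      exact absurd hca (by simpa using this c hc)
  rw [h1, h2, Bool.and_comm]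

-- ===== VERDICT (by name: the statement is the Claim_ definition above) =====
theorem eval_all_uppercase_words_spec : Claim_equal_eval_all_uppercase_words := by
  intro text _
  unfold Spec_eval_all_uppercase_words eval_all_uppercase_words eval_all_uppercase_words_alt
  set s := text.toList with hs
  by_cases hw : (PySem.Chars.split₀ s).isEmpty
  · rw [List.isEmpty_iff] at hw
    have hf : s.filter PySem.Chars.isalpha = [] := by
      rw [← filter_alpha_flatten s, hw]; simp
    simp [hw, hf]
  · simp only [hw, Bool.false_eq_true, if_false]
    rw [pvALoop_eq, bool_bridge, filter_alpha_flatten]
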